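-- pv_equiv track=rewrite | github.com/miliar/Code_Jam_Webscraper | solutions_python/solutions_year15_round0_nr1/650.py | solve
-- ===== SOURCE A (Python) =====
-- def solve(ss):
--   missing = 0
--   total = 0
--   for sLevel, sCount in enumerate(ss):
--     curMissing = 0
--     if sLevel > total:
--       curMissing = sLevel - total
--     missing += curMissing
--     total +=  curMissing + sCount
--   return missing
-- ===== SOURCE B (Python) =====
-- def solve(ss):
--     gaps = []
--     prefix = 0
--     for i, c in enumerate(ss):
--         gaps.append(i - prefix)
--         prefix += c
--     return max([0] + gaps)
-- ===== Notes on version B (the rewrite author's own statement) =====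
-- stated objective: simpler
-- what changed: B drops A's feedback recurrence (where total is bumped by the missing levels added so far): it computes the plain prefix sums of the counts, forms the list of deficits i - prefix_i, and returns the maximum of 0 and these deficits, since topping up the largest deficit once covers all earlier ones.
import Mathlib
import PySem

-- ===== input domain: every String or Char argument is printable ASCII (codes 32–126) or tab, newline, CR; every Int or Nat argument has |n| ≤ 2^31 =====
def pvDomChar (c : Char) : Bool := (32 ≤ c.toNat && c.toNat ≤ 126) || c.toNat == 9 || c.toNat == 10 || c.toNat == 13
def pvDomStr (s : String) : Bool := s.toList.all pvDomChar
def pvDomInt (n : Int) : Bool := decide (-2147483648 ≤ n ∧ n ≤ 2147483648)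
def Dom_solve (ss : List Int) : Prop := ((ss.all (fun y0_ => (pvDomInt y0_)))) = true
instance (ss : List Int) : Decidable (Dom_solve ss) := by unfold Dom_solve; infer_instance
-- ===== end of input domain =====

-- B replaces A's feedback recurrence by the max-of-prefix-deficits formula
-- max(0, max_i (i - sum ss[:i])) (objective: simpler, same O(n) cost).

-- ===== PORT A =====
-- loop over enumerate(ss) carrying (missing, total); branch in the same order as A
def solveGo : List Int → Int → Int → Int → Int
  | [], _, missing, _ => missing
  | c :: rest, i, missing, total =>
    let curMissing := if i > total then i - total else 0
    solveGo rest (i + 1) (missing + curMissing) (total + curMissing + c)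

def solve (ss : List Int) : Int := solveGo ss 0 0 0

-- ===== PORT B =====
-- loop over enumerate(ss) building the deficit list, carrying the plain prefix sum
def gapsGo : List Int → Int → Int → List Int
  | [], _, _ => []
  | c :: rest, i, pfx => (i - pfx) :: gapsGo rest (i + 1) (pfx + c)

-- max([0] + gaps): Python's max of the nonempty list 0 :: gaps
def solve_alt (ss : List Int) : Int := (gapsGo ss 0 0).foldl max 0

-- ===== PRECONDITION & SPEC =====
def Spec_solve (ss : List Int) (out : Int) : Prop := out = solve_alt ss
instance (ss : List Int) (out : Int) : Decidable (Spec_solve ss out) := by unfold Spec_solve; infer_instance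

-- ===== CLAIM (what is proved, stated in full; the proofs are below) =====
def Claim_equal_solve : Prop := ∀ (ss : List Int), Dom_solve ss → Spec_solve ss (solve ss)

-- ===== LEMMAS AND PROOFS =====
-- D ss i t = max(0, max_j ((i+j) - (t + prefix_j))): the clamped worst deficit; both sides reduce to it.
def D : List Int → Int → Int → Int
  | [], _, _ => 0
  | c :: rest, i, t => max (max 0 (i - t)) (D rest (i + 1) (t + c))

theorem D_nonneg (ss : List Int) : ∀ i t : Int, 0 ≤ D ss i t := by
  induction ss with
  | nil => intro i t; simp [D]
  | cons c rest ih => intro i t; simp only [D]; have := ih (i+1) (t+c); omega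

-- shifting the base total up by d ≥ 0 just clamps the deficit down by d
theorem D_shift (ss : List Int) : ∀ (i t d : Int), 0 ≤ d → D ss i (t + d) = max 0 (D ss i t - d) := by
  induction ss with
  | nil => intro i t d hd; simp [D]; omega
  | cons c rest ih =>
    intro i t d hd
    simp only [D]
    rw [show t + d + c = (t + c) + d by ring, ih (i+1) (t+c) d hd]
    have := D_nonneg rest (i+1) (t+c)
    omega

-- A's loop result is missing + the clamped worst remaining deficit
theorem solveGo_eq_D (ss : List Int) : ∀ (i missing total : Int),
    solveGo ss i missing total = missing + D ss i total := by
  induction ss with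
  | nil => intro i m t; simp [solveGo, D]
  | cons c rest ih =>
    intro i m t
    simp only [solveGo, D]
    rw [ih]
    set d := if i > t then i - t else 0 with hd
    rw [show t + d + c = (t + c) + d by ring, D_shift rest (i+1) (t+c) d (by split_ifs at hd <;> omega)]
    have := D_nonneg rest (i+1) (t+c)
    split_ifs at hd <;> omega

-- B's fold over the deficit list computes the same clamped maximum
theorem foldl_gapsGo (ss : List Int) : ∀ (i p a : Int), 0 ≤ a →
    (gapsGo ss i p).foldl max a = max a (D ss i p) := by
  induction ss with
  | nil => intro i p a ha; simp [gapsGo, D]; omega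
  | cons c rest ih =>
    intro i p a ha
    simp only [gapsGo, D, List.foldl_cons]
    rw [ih (i+1) (p+c) (max a (i - p)) (by omega)]
    have := D_nonneg rest (i+1) (p+c)
    omega

-- ===== VERDICT (by name: the statement is the Claim_ definition above) =====
theorem solve_spec : Claim_equal_solve := by
  intro ss _
  unfold Spec_solve solve solve_alt
  rw [solveGo_eq_D, foldl_gapsGo ss 0 0 0 le_rfl]
  have := D_nonneg ss 0 0
  omega
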